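-- pv_equiv track=rewrite | github.com/LiXinyuan12345/ACSL | AllStar/Intermediate/Programming/2023_allstar_p2.py | pass3
-- ===== SOURCE A (Python) =====
-- def pass3(param_lines,min_v,max_v):
--
--       sum1 =0
--       sum2 = 0
--       for v in range(min_v,max_v+1):
--             hit = 0
--             for line in param_lines:
--                 for  rng in line:
--                     if rng[0] <= v <= rng[1]:
--                         hit+=1
--                         break
--             if hit==1:
--                 sum1 += v
--             if hit==2:
--                 sum2 += v
--
--       return sum1,sum2
-- ===== SOURCE B (Python) =====
-- def pass3(param_lines, min_v, max_v):
--     # Difference-array sweep: per line, mark clipped interval endpoints, take the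
--     # running prefix sum to get a boolean coverage list, then one pass over the
--     # value range counting covering lines per position.
--     n = max_v - min_v + 1
--     if n <= 0:
--         return (0, 0)
--     covs = []
--     for line in param_lines:
--         d = [0] * (n + 1)
--         for a, b in line:
--             lo = a if a > min_v else min_v
--             hi = b if b < max_v else max_v
--             if lo <= hi:
--                 d[lo - min_v] += 1
--                 d[hi - min_v + 1] -= 1
--         run = 0
--         cov = []
--         for i in range(n):
--             run += d[i]
--             cov.append(run > 0)
--         covs.append(cov)
--     s1 = 0
--     s2 = 0
--     for i in range(n):
--         hit = sum(1 for c in covs if c[i])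
--         if hit == 1:
--             s1 += min_v + i
--         elif hit == 2:
--             s2 += min_v + i
--     return (s1, s2)
-- ===== Notes on version B (the rewrite author's own statement) =====
-- stated objective: alternative
-- what changed: Replaced the per-value rescan of every line's every range with a difference-array sweep: each line's clipped interval endpoints are marked once, a prefix-sum pass yields its coverage booleans, and a single pass over the value range counts covering lines.
import Mathlib
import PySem

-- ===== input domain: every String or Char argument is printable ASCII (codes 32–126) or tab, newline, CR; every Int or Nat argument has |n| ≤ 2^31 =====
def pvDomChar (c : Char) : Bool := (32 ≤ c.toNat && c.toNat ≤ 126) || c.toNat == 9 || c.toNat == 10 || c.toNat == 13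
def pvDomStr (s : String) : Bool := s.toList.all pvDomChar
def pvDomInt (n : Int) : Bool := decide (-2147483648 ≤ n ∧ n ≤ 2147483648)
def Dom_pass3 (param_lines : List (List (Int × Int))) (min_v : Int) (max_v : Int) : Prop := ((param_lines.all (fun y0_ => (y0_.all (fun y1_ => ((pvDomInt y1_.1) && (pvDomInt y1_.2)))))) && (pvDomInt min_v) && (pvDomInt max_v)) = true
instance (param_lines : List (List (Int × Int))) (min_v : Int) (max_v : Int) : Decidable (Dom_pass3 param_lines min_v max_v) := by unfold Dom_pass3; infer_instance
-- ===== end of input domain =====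

-- B replaces A's per-value rescan of all ranges by a per-line difference-array
-- sweep followed by one counting pass over the value range (objective: alternative).

-- ===== PORT A =====

-- inner 'for rng in line: if cover: hit += 1; break' — the increment to hit
def pvFirstHit (v : Int) : List (Int × Int) → Int
  | [] => 0
  | r :: rest => if r.1 ≤ v ∧ v ≤ r.2 then 1 else pvFirstHit v rest

def pass3 (param_lines : List (List (Int × Int))) (min_v : Int) (max_v : Int) : Int × Int :=
  (PySem.List.pyRange min_v (max_v + 1) 1).foldl
    (fun (s : Int × Int) v =>
      let hit : Int := param_lines.foldl (fun h line => h + pvFirstHit v line) 0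
      let s1 := if hit = 1 then s.1 + v else s.1
      let s2 := if hit = 2 then s.2 + v else s.2
      (s1, s2))
    (0, 0)

-- ===== PORT B =====

-- d[j] += x (Source B only does this with j in range)
def pvBump (d : List Int) (j : Nat) (x : Int) : List Int :=
  d.set j (d.getD j 0 + x)

-- body of the marking loop: clip (a, b) to [min_v, max_v], mark the endpoints
def pvMark (min_v max_v : Int) (d : List Int) (r : Int × Int) : List Int :=
  let lo := if r.1 > min_v then r.1 else min_v
  let hi := if r.2 < max_v then r.2 else max_v
  if lo ≤ hi then pvBump (pvBump d (lo - min_v).toNat 1) (hi - min_v + 1).toNat (-1) else d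

def pvDiff (min_v max_v : Int) (n : Nat) (line : List (Int × Int)) : List Int :=
  line.foldl (pvMark min_v max_v) (List.replicate (n + 1) 0)

-- run = 0; cov = []; for i in range(n): run += d[i]; cov.append(run > 0)
def pvCov (n : Nat) (d : List Int) : List Bool :=
  ((List.range n).foldl
    (fun (st : Int × List Bool) i =>
      let run := st.1 + d.getD i 0
      (run, st.2 ++ [decide (run > 0)]))
    (0, [])).2

def pass3_alt (param_lines : List (List (Int × Int))) (min_v : Int) (max_v : Int) : Int × Int :=
  let n := max_v - min_v + 1
  if n ≤ 0 then (0, 0)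
  else
    let nn := n.toNat
    let covs := param_lines.map (fun line => pvCov nn (pvDiff min_v max_v nn line))
    (List.range nn).foldl
      (fun (s : Int × Int) i =>
        let hit : Int := (covs.filter (fun c => c.getD i false)).length
        if hit = 1 then (s.1 + (min_v + i), s.2)
        else if hit = 2 then (s.1, s.2 + (min_v + i))
        else s)
      (0, 0)

-- ===== PRECONDITION & SPEC =====
def Spec_pass3 (param_lines : List (List (Int × Int))) (min_v : Int) (max_v : Int) (out : Int × Int) : Prop := out = pass3_alt param_lines min_v max_v
instance (param_lines : List (List (Int × Int))) (min_v : Int) (max_v : Int) (out : Int × Int) : Decidable (Spec_pass3 param_lines min_v max_v out) := by unfold Spec_pass3; infer_instance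

-- ===== CLAIM (what is proved, stated in full; the proofs are below) =====
def Claim_equal_pass3 : Prop := ∀ (param_lines : List (List (Int × Int))) (min_v : Int) (max_v : Int), Dom_pass3 param_lines min_v max_v → Spec_pass3 param_lines min_v max_v (pass3 param_lines min_v max_v)

-- ===== LEMMAS AND PROOFS =====

def pvCover (v : Int) (r : Int × Int) : Bool := decide (r.1 ≤ v ∧ v ≤ r.2)

def pvLineCov (v : Int) (line : List (Int × Int)) : Bool := line.any (pvCover v)

-- the common per-value step: hit = number of lines covering v
def pvStep (pl : List (List (Int × Int))) (s : Int × Int) (v : Int) : Int × Int :=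
  ((if (pl.countP (pvLineCov v) : Int) = 1 then s.1 + v else s.1),
   (if (pl.countP (pvLineCov v) : Int) = 2 then s.2 + v else s.2))

theorem pvFirstHit_eq (v : Int) (line : List (Int × Int)) :
    pvFirstHit v line = if pvLineCov v line then 1 else 0 := by
  induction line with
  | nil => simp [pvFirstHit, pvLineCov]
  | cons r rest ih =>
    simp only [pvFirstHit, pvLineCov, List.any_cons]
    by_cases h : r.1 ≤ v ∧ v ≤ r.2
    · simp [pvCover, h]
    · have hc : pvCover v r = false := by
        unfold pvCover; exact decide_eq_false h
      rw [if_neg h]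
      simp only [hc, Bool.false_or]
      simpa [pvLineCov] using ih

theorem passA_eq (pl : List (List (Int × Int))) (mn mx : Int) :
    pass3 pl mn mx = (PySem.List.pyRange mn (mx + 1) 1).foldl (pvStep pl) (0, 0) := by
  unfold pass3
  apply PySem.List.foldl_congr_mem
  intro s v _
  have h1 : pl.foldl (fun h line => h + pvFirstHit v line) 0
      = (pl.countP (pvLineCov v) : Int) := by
    have := PySem.List.foldl_add pl (fun line => pvFirstHit v line) 0
    rw [this]
    simp only [pvFirstHit_eq]
    rw [PySem.List.sum_map_ite_one_zero]
    simp
  simp only [h1, pvStep]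

theorem pvBump_length (d : List Int) (j : Nat) (x : Int) :
    (pvBump d j x).length = d.length := by simp [pvBump]

theorem pvMark_length (mn mx : Int) (d : List Int) (r : Int × Int) :
    (pvMark mn mx d r).length = d.length := by
  simp [pvMark, pvBump, apply_ite List.length]

theorem take_succ_sum (d : List Int) (n : Nat) :
    (d.take (n + 1)).sum = (d.take n).sum + d.getD n 0 := by
  rw [List.take_add_one, List.sum_append]
  by_cases h : n < d.length
  · simp [List.getElem?_eq_getElem h]
  · have h1 : d.length ≤ n := Nat.le_of_not_lt h
    simp [h1]

theorem pvBump_take_sum (d : List Int) (j : Nat) (x : Int) (k : Nat) (hj : j < d.length) :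
    ((pvBump d j x).take k).sum = (d.take k).sum + if j < k then x else 0 := by
  unfold pvBump
  rw [List.take_set]
  by_cases h : j < k
  · have hjt : j < (d.take k).length := by simp; omega
    rw [List.sum_set]
    have hsplit : (d.take k).sum
        = ((d.take k).take j).sum + ((d.take k).drop j).sum := by
      rw [← List.sum_append, List.take_append_drop]
    have hdrop : (d.take k).drop j = (d.take k)[j] :: (d.take k).drop (j + 1) := by
      exact List.drop_eq_getElem_cons hjt
    have hget : (d.take k)[j] = d.getD j 0 := by
      rw [List.getElem_take, List.getD_eq_getElem d 0 hj]
    rw [hsplit, hdrop]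
    simp only [List.sum_cons, hget, if_pos hjt, if_pos h]
    ring
  · rw [List.set_eq_of_length_le (by simp; omega)]
    simp [h]

theorem pvDiff_fold_sum (mn mx : Int) (nn : Nat) (hmx : mx + 1 = mn + (nn : Int))
    (line : List (Int × Int)) (d : List Int) (hd : d.length = nn + 1)
    (i : Nat) (hi : i < nn) :
    ((line.foldl (pvMark mn mx) d).take (i + 1)).sum
      = (d.take (i + 1)).sum + (line.countP (pvCover (mn + i)) : Int) := by
  induction line generalizing d with
  | nil => simp
  | cons r rest ih =>
    rw [List.foldl_cons]
    rw [ih (pvMark mn mx d r) (by rw [pvMark_length, hd])]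
    have hmark : ((pvMark mn mx d r).take (i + 1)).sum
        = (d.take (i + 1)).sum + (if pvCover (mn + i) r then 1 else 0) := by
      unfold pvMark
      set lo := if r.1 > mn then r.1 else mn with hlo
      set hi' := if r.2 < mx then r.2 else mx with hhi
      have hlo1 : mn ≤ lo := by rw [hlo]; split <;> omega
      have hhi1 : hi' ≤ mx := by rw [hhi]; split <;> omega
      by_cases hc : lo ≤ hi'
      · rw [if_pos hc]
        have hj1 : (lo - mn).toNat < (pvBump d (lo - mn).toNat 1).length := by
          rw [pvBump_length, hd]; omega
        have hj1' : (lo - mn).toNat < d.length := by rw [hd]; omega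
        rw [pvBump_take_sum _ _ _ _ (by rw [pvBump_length]; exact by rw [hd]; omega)]
        rw [pvBump_take_sum _ _ _ _ hj1']
        have hcov : pvCover (mn + i) r = decide (lo ≤ mn + i ∧ (mn + (i : Int)) ≤ hi') := by
          simp only [pvCover, hlo, hhi]
          by_cases h1 : r.1 > mn <;> by_cases h2 : r.2 < mx <;>
            simp only [if_pos, h1, h2, ite_false, decide_eq_decide] <;>
            constructor <;> intro hh <;> omega
        rw [hcov]
        have e1 : ((lo - mn).toNat < i + 1) ↔ lo ≤ mn + (i : Int) := by omega
        have e2 : ((hi' - mn + 1).toNat < i + 1) ↔ hi' < mn + (i : Int) := by omega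
        by_cases c1 : lo ≤ mn + (i : Int) <;> by_cases c2 : (mn + (i : Int)) ≤ hi' <;>
          simp only [e1, e2, c1, c2] <;> split_ifs <;> simp_all <;> omega
      · rw [if_neg hc]
        have : pvCover (mn + i) r = false := by
          simp only [pvCover, hlo, hhi] at *
          by_cases h1 : r.1 > mn <;> by_cases h2 : r.2 < mx <;> simp_all <;> omega
        simp [this]
    rw [hmark]
    simp only [List.countP_cons]
    by_cases hc : pvCover (mn + i) r <;> (simp [hc]; try ring)

theorem pvCov_aux (d : List Int) (n : Nat) :
    (List.range n).foldl
      (fun (st : Int × List Bool) i =>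
        let run := st.1 + d.getD i 0
        (run, st.2 ++ [decide (run > 0)]))
      (0, [])
    = ((d.take n).sum, (List.range n).map (fun i => decide ((d.take (i + 1)).sum > 0))) := by
  induction n with
  | zero => simp
  | succ m ih =>
    rw [List.range_succ, List.foldl_append, ih, List.map_append]
    simp only [List.foldl_cons, List.foldl_nil]
    rw [← take_succ_sum]
    simp

theorem pvCov_eq (d : List Int) (n : Nat) :
    pvCov n d = (List.range n).map (fun i => decide ((d.take (i + 1)).sum > 0)) := by
  unfold pvCov
  rw [pvCov_aux]

theorem pvCov_getD (mn mx : Int) (nn : Nat) (hmx : mx + 1 = mn + (nn : Int))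
    (line : List (Int × Int)) (i : Nat) (hi : i < nn) :
    (pvCov nn (pvDiff mn mx nn line)).getD i false = pvLineCov (mn + i) line := by
  rw [pvCov_eq, PySem.List.getD_map_range _ nn i false hi]
  unfold pvDiff
  rw [pvDiff_fold_sum mn mx nn hmx line _ (by simp) i hi]
  have hz : ((List.replicate (nn + 1) (0 : Int)).take (i + 1)).sum = 0 := by
    simp [List.take_replicate]
  rw [hz, zero_add]
  simp only [pvLineCov]
  rcases h : line.any (pvCover (mn + i)) with _ | _
  · simp only [List.any_eq_false] at h
    have : line.countP (pvCover (mn + i)) = 0 := by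
      rw [List.countP_eq_zero]; exact h
    simp [this]
  · simp
    rcases List.any_eq_true.mp h with ⟨⟨ra, rb⟩, h1, h2⟩
    exact ⟨ra, rb, h1, h2⟩

theorem hit_alt (pl : List (List (Int × Int))) (mn mx : Int) (nn : Nat)
    (hmx : mx + 1 = mn + (nn : Int)) (i : Nat) (hi : i < nn) :
    (((pl.map (fun line => pvCov nn (pvDiff mn mx nn line))).filter
        (fun c => c.getD i false)).length : Int)
      = (pl.countP (pvLineCov (mn + i)) : Int) := by
  rw [← List.countP_eq_length_filter, List.countP_map]
  congr 2
  funext line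
  simp only [Function.comp]
  rw [pvCov_getD mn mx nn hmx line i hi]

-- ===== VERDICT (by name: the statement is the Claim_ definition above) =====
theorem pass3_spec : Claim_equal_pass3 := by
  intro pl mn mx _
  unfold Spec_pass3
  rw [passA_eq]
  unfold pass3_alt
  by_cases hn : mx - mn + 1 ≤ 0
  · rw [if_pos hn, PySem.List.pyRange_one_eq_nil (by omega)]
    rfl
  · rw [if_neg hn]
    set nn := (mx - mn + 1).toNat with hnn
    have hmx : mx + 1 = mn + (nn : Int) := by omega
    have hr : PySem.List.pyRange mn (mx + 1) 1
        = (List.range nn).map (fun (k : Nat) => mn + (k : Int)) := by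
      rw [PySem.List.pyRange_one]
      have hq : (mx + 1 - mn).toNat = nn := by omega
      rw [hq]
    rw [hr, List.foldl_map]
    show (List.range nn).foldl (fun s (y : Nat) => pvStep pl s (mn + (y : Int))) (0, 0)
        = (List.range nn).foldl
            (fun (s : Int × Int) (i : Nat) =>
              let hit : Int := (((pl.map (fun line => pvCov nn (pvDiff mn mx nn line))).filter
                  (fun c => c.getD i false)).length : Int)
              if hit = 1 then (s.1 + (mn + (i : Int)), s.2)
              else if hit = 2 then (s.1, s.2 + (mn + (i : Int)))
              else s)
            (0, 0)
    apply PySem.List.foldl_congr_mem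
    intro s i hi
    rw [List.mem_range] at hi
    simp only [pvStep]
    rw [hit_alt pl mn mx nn hmx i hi]
    set h := (pl.countP (pvLineCov (mn + i)) : Int)
    by_cases h1 : h = 1
    · simp [h1]
    · by_cases h2 : h = 2 <;> simp [h1, h2]
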